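-- pv_equiv track=rewrite | github.com/Seiichi077870/data-transfer | main★★.py | _find_best_pattern_simple
-- ===== SOURCE A (Python) =====
-- def _find_best_pattern_simple(lane, required_parts, pattern_dict, lr_pair_map):
--     """最適パターンを検索（数量無視版）"""
--
--     # L/R専用部品を検出
--     lr_specific_parts = {}
--     lr_prefix_groups = {}
--     common_parts = set()
--
--     for part1 in required_parts:
--         if len(part1) >= 10:
--             prefix1 = part1[:8]
--
--             for part2 in required_parts:
--                 if part1 != part2 and len(part2) >= 10:
--                     if part2[:8] == prefix1 and part1[-2:] != part2[-2:]:
--                         if prefix1 not in lr_prefix_groups: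
--                             lr_prefix_groups[prefix1] = []
--
--                         if part1 not in lr_prefix_groups[prefix1]:
--                             lr_prefix_groups[prefix1].append(part1)
--                             lr_specific_parts[part1] = prefix1
--
--     # ペアの出庫先を取得
--     pair_lane = lr_pair_map.get(lane, "")
--
--     # 最適パターンを検索
--     best_pattern = ""
--     best_score = (-1, 999999, 999999)
--
--     for key, pattern_parts in pattern_dict.items():
--         if not key.startswith(f"{lane}|"):
--             continue
--
--         pattern = key.split("|")[1]
--
--         match_count = 0
--         missing_count = 0
--
--         for part in required_parts:
--             matched = False
--
--             # 共通部品の場合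
--             if part in common_parts:
--                 if part in pattern_parts:
--                     match_count += 1
--                     matched = True
--
--             # L/R専用部品の場合
--             elif part in lr_specific_parts:
--                 if part in pattern_parts:
--                     match_count += 1
--                     matched = True
--                 elif pair_lane:
--                     # ペアの出庫先に該当部品があるかチェック
--                     pair_key = f"{pair_lane}|{pattern}"
--                     if pair_key in pattern_dict:
--                         prefix = lr_specific_parts[part]
--                         for pair_part in lr_prefix_groups.get(prefix, []):
--                             if pair_part != part and pair_part in pattern_dict[pair_key]:
--                                 match_count += 1
--                                 matched = True
--                                 break
--
--             # その他の部品
--             else: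
--                 if part in pattern_parts:
--                     match_count += 1
--                     matched = True
--
--             if not matched:
--                 missing_count += 1
--
--         excess_count = len(pattern_parts) - match_count
--         score = (match_count, -missing_count, -excess_count)
--
--         if score > best_score:
--             best_score = score
--             best_pattern = pattern
--
--     return best_pattern
-- ===== SOURCE B (Python) =====
-- def _find_best_pattern_simple(lane, required_parts, pattern_dict, lr_pair_map):
--     """Best-matching pattern (quantity-ignoring), single-pass prefix bucketing."""
--
--     # Bucket long part numbers by their 8-char prefix in one pass:
--     # buckets[prefix] = set of parts, sufs[prefix] = set of last-2-char suffixes.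
--     buckets = {}
--     sufs = {}
--     for p in required_parts:
--         if len(p) >= 10:
--             pre = p[:8]
--             buckets.setdefault(pre, set()).add(p)
--             sufs.setdefault(pre, set()).add(p[-2:])
--
--     def is_lr(p):
--         # p is an L/R-specific part iff some equally-prefixed long part has a
--         # different 2-char suffix.
--         return len(p) >= 10 and any(t != p[-2:] for t in sufs.get(p[:8], ()))
--
--     pair_lane = lr_pair_map.get(lane, "")
--
--     best = None  # (score, pattern); score = (match_count, match_count - len(parts))
--     for key, pattern_parts in pattern_dict.items():
--         if not key.startswith(lane + "|"):
--             continue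
--         pattern = key.split("|")[1]
--         pset = set(pattern_parts)
--
--         def ok(part):
--             if part in pset:
--                 return True
--             if pair_lane and is_lr(part):
--                 pair_parts = pattern_dict.get(pair_lane + "|" + pattern)
--                 if pair_parts is not None:
--                     return any(q != part and q in pair_parts
--                                for q in buckets.get(part[:8], ()))
--             return False
--
--         match = sum(1 for part in required_parts if ok(part))
--         score = (match, match - len(pattern_parts))
--         if best is None or score > best[0]:
--             best = (score, pattern)
--
--     return best[1] if best is not None else ""
-- ===== Notes on version B (the rewrite author's own statement) =====
-- stated objective: alternative
-- what changed: The O(n^2) nested scan that detects L/R-specific parts is replaced by one pass that buckets long parts and their 2-char suffixes by 8-char prefix (a part is L/R iff its prefix bucket holds another suffix), per-pattern membership tests use a set instead of scanning the parts list, match/missing/excess counting collapses to a single count, and the best pattern is tracked as an Option with a 2-component score (the middle score component is redundant).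
import Mathlib
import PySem

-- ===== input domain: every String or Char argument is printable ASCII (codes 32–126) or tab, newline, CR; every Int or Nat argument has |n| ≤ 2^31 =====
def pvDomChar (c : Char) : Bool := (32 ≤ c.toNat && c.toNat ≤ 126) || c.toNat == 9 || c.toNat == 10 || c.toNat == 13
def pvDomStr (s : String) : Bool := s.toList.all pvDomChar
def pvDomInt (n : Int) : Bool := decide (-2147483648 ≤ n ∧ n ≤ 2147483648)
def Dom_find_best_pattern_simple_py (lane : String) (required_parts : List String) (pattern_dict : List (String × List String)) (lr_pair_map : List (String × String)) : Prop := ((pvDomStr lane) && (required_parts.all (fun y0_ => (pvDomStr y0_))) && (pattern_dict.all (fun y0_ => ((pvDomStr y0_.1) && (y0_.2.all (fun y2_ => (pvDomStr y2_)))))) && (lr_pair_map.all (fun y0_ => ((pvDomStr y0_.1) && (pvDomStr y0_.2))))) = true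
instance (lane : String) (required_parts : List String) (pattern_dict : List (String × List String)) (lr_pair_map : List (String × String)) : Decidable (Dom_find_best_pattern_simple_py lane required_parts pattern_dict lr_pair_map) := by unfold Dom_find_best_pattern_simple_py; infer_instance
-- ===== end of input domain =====

-- B replaces A's nested L/R-part detection scan by one-pass bucketing by 8-char
-- prefix and drops the redundant middle score component (objective: alternative).
-- Both ports read pattern_dict / lr_pair_map through PySem.Dict.ofList (the Python
-- arguments are dicts).

-- ===== PORT A =====
-- shared slice abbreviations: p[:8] and p[-2:]
def pvPre (p : String) : String := PySem.Str.slice p none (some 8)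
def pvSuf (p : String) : String := PySem.Str.slice p (some (-2)) none

-- Python 3-tuple strict '>' on (int, int, int)
def pyGt3 (a b : Int × Int × Int) : Bool :=
  a.1 > b.1 || (a.1 == b.1 && (a.2.1 > b.2.1 || (a.2.1 == b.2.1 && a.2.2 > b.2.2)))

-- body of A's inner 'for part2 in required_parts' loop; state = (lr_specific_parts, lr_prefix_groups)
def aInnerStep (part1 prefix1 : String)
    (st : PySem.Dict String String × PySem.Dict String (List String)) (part2 : String) :
    PySem.Dict String String × PySem.Dict String (List String) :=
  if part1 ≠ part2 ∧ 10 ≤ PySem.Str.len part2 then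
    if pvPre part2 = prefix1 ∧ pvSuf part1 ≠ pvSuf part2 then
      let gr := if st.2.contains prefix1 then st.2 else st.2.insert prefix1 ([] : List String)
      if part1 ∈ gr.getD prefix1 [] then (st.1, gr)
      else (st.1.insert part1 prefix1, gr.insert prefix1 (gr.getD prefix1 [] ++ [part1]))
    else st
  else st

-- A's whole L/R-detection double loop
def aDetect (required_parts : List String) :
    PySem.Dict String String × PySem.Dict String (List String) :=
  required_parts.foldl
    (fun st part1 =>
      if 10 ≤ PySem.Str.len part1 then
        required_parts.foldl (aInnerStep part1 (pvPre part1)) st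
      else st)
    (PySem.Dict.empty, PySem.Dict.empty)

-- A's per-part 'matched' computation (common_parts is always the empty set)
def aMatched (common : PySem.Set String) (sp : PySem.Dict String String)
    (gr : PySem.Dict String (List String)) (pd : PySem.Dict String (List String))
    (pair_lane pattern : String) (pattern_parts : List String) (part : String) : Bool :=
  if PySem.Set.contains common part then pattern_parts.contains part
  else if sp.contains part then
    if pattern_parts.contains part then true
    else if pair_lane ≠ "" then
      let pair_key := pair_lane ++ "|" ++ pattern
      if pd.contains pair_key then
        -- lr_specific_parts[part]: present, guarded by the contains test above
        let pre := sp.getD part ""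
        (gr.getD pre []).any (fun q => q != part && (pd.getD pair_key []).contains q)
      else false
    else false
  else pattern_parts.contains part

-- body of A's 'for key, pattern_parts in pattern_dict.items()' loop; state = (best_pattern, best_score)
def aScoreStep (lane : String) (required_parts : List String) (common : PySem.Set String)
    (sp : PySem.Dict String String) (gr : PySem.Dict String (List String))
    (pd : PySem.Dict String (List String)) (pair_lane : String)
    (best : String × (Int × Int × Int)) (item : String × List String) :
    String × (Int × Int × Int) :=
  if PySem.Str.startswith item.1 (lane ++ "|") then
    -- key.split("|")[1]: index 1 exists because key starts with lane + "|"
    let pattern := PySem.List.pyGetD ((PySem.Str.split? item.1 "|").getD []) 1 ""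
    let mm := required_parts.foldl
      (fun (mm : Int × Int) part =>
        if aMatched common sp gr pd pair_lane pattern item.2 part then (mm.1 + 1, mm.2)
        else (mm.1, mm.2 + 1))
      ((0 : Int), (0 : Int))
    let excess : Int := (item.2.length : Int) - mm.1
    let score : Int × Int × Int := (mm.1, -mm.2, -excess)
    if pyGt3 score best.2 then (pattern, score) else best
  else best

def find_best_pattern_simple_py (lane : String) (required_parts : List String) (pattern_dict : List (String × List String)) (lr_pair_map : List (String × String)) : String :=
  let pd : PySem.Dict String (List String) := PySem.Dict.ofList pattern_dict
  let lrm : PySem.Dict String String := PySem.Dict.ofList lr_pair_map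
  let common : PySem.Set String := PySem.Set.empty
  let st := aDetect required_parts
  let pair_lane := lrm.getD lane ""
  let res := pd.items.foldl
    (aScoreStep lane required_parts common st.1 st.2 pd pair_lane)
    ("", ((-1 : Int), (999999 : Int), (999999 : Int)))
  res.1

-- ===== PORT B =====
-- Python 2-tuple strict '>' on (int, int)
def pyGt2 (a b : Int × Int) : Bool := a.1 > b.1 || (a.1 == b.1 && a.2 > b.2)

-- body of B's single bucketing pass; state = (buckets, sufs)
def bBucketStep (st : PySem.Dict String (PySem.Set String) × PySem.Dict String (PySem.Set String))
    (p : String) :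
    PySem.Dict String (PySem.Set String) × PySem.Dict String (PySem.Set String) :=
  if 10 ≤ PySem.Str.len p then
    (st.1.modify (pvPre p) [] (fun s => PySem.Set.add s p),
     st.2.modify (pvPre p) [] (fun s => PySem.Set.add s (pvSuf p)))
  else st

def bIsLr (sufs : PySem.Dict String (PySem.Set String)) (p : String) : Bool :=
  decide (10 ≤ PySem.Str.len p) && (sufs.getD (pvPre p) []).any (fun t => t != pvSuf p)

def bOk (buckets sufs : PySem.Dict String (PySem.Set String))
    (pd : PySem.Dict String (List String)) (pair_lane pattern : String)
    (pset : PySem.Set String) (part : String) : Bool :=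
  if PySem.Set.contains pset part then true
  else if pair_lane ≠ "" ∧ bIsLr sufs part then
    match pd.get? (pair_lane ++ "|" ++ pattern) with
    | some pair_parts =>
        (buckets.getD (pvPre part) []).any (fun q => q != part && pair_parts.contains q)
    | none => false
  else false

-- body of B's pattern loop; state = Option (score, pattern)
def bScoreStep (lane : String) (required_parts : List String)
    (buckets sufs : PySem.Dict String (PySem.Set String))
    (pd : PySem.Dict String (List String)) (pair_lane : String)
    (best : Option ((Int × Int) × String)) (item : String × List String) :
    Option ((Int × Int) × String) :=
  if PySem.Str.startswith item.1 (lane ++ "|") then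
    let pattern := PySem.List.pyGetD ((PySem.Str.split? item.1 "|").getD []) 1 ""
    let pset : PySem.Set String := PySem.Set.ofList item.2
    let m : Int := (required_parts.countP (bOk buckets sufs pd pair_lane pattern pset) : Int)
    let score : Int × Int := (m, m - (item.2.length : Int))
    match best with
    | none => some (score, pattern)
    | some b => if pyGt2 score b.1 then some (score, pattern) else best
  else best

def find_best_pattern_simple_py_alt (lane : String) (required_parts : List String) (pattern_dict : List (String × List String)) (lr_pair_map : List (String × String)) : String :=
  let pd : PySem.Dict String (List String) := PySem.Dict.ofList pattern_dict
  let lrm : PySem.Dict String String := PySem.Dict.ofList lr_pair_map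
  let bs := required_parts.foldl bBucketStep (PySem.Dict.empty, PySem.Dict.empty)
  let pair_lane := lrm.getD lane ""
  let best := pd.items.foldl (bScoreStep lane required_parts bs.1 bs.2 pd pair_lane) none
  match best with
  | some b => b.2
  | none => ""

-- ===== PRECONDITION & SPEC =====
def Spec_find_best_pattern_simple_py (lane : String) (required_parts : List String) (pattern_dict : List (String × List String)) (lr_pair_map : List (String × String)) (out : String) : Prop := out = find_best_pattern_simple_py_alt lane required_parts pattern_dict lr_pair_map
instance (lane : String) (required_parts : List String) (pattern_dict : List (String × List String)) (lr_pair_map : List (String × String)) (out : String) : Decidable (Spec_find_best_pattern_simple_py lane required_parts pattern_dict lr_pair_map out) := by unfold Spec_find_best_pattern_simple_py; infer_instance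

-- ===== CLAIM (what is proved, stated in full; the proofs are below) =====
def Claim_equal_find_best_pattern_simple_py : Prop := ∀ (lane : String) (required_parts : List String) (pattern_dict : List (String × List String)) (lr_pair_map : List (String × String)), Dom_find_best_pattern_simple_py lane required_parts pattern_dict lr_pair_map → Spec_find_best_pattern_simple_py lane required_parts pattern_dict lr_pair_map (find_best_pattern_simple_py lane required_parts pattern_dict lr_pair_map)

-- ===== LEMMAS AND PROOFS =====

-- the specification predicate: p is an L/R-specific part of req
def pvIsLR (req : List String) (p : String) : Prop :=
  10 ≤ PySem.Str.len p ∧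
    ∃ q ∈ req, p ≠ q ∧ 10 ≤ PySem.Str.len q ∧ pvPre q = pvPre p ∧ pvSuf p ≠ pvSuf q

-- generic: membership in a bucket dict built by a guarded modify/Set.add fold
theorem mem_getD_fold_modify_add {α : Type} (key val : α → String) (c : α → Prop)
    [DecidablePred c] (l : List α) (d : PySem.Dict String (PySem.Set String))
    (k y : String) :
    y ∈ (l.foldl (fun d x => if c x then d.modify (key x) [] (fun s => PySem.Set.add s (val x)) else d) d).getD k [] ↔
      y ∈ d.getD k [] ∨ ∃ x ∈ l, c x ∧ key x = k ∧ val x = y := by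
  induction l generalizing d with
  | nil => simp
  | cons x t ih =>
    simp only [List.foldl_cons]
    by_cases hc : c x
    · rw [if_pos hc, ih, PySem.Dict.getD_modify]
      by_cases hk : k = key x
      · subst hk
        rw [if_pos rfl]
        simp only [PySem.Set.mem_add, List.mem_cons]
        constructor
        · rintro ((h | h) | ⟨z, hz, hcz, hkz, hvz⟩)
          · exact Or.inl h
          · exact Or.inr ⟨x, Or.inl rfl, hc, rfl, h.symm⟩
          · exact Or.inr ⟨z, Or.inr hz, hcz, hkz, hvz⟩
        · rintro (h | ⟨z, rfl | hz, hcz, hkz, hvz⟩)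
          · exact Or.inl (Or.inl h)
          · exact Or.inl (Or.inr hvz.symm)
          · exact Or.inr ⟨z, hz, hcz, hkz, hvz⟩
      · rw [if_neg hk]
        simp only [List.mem_cons]
        constructor
        · rintro (h | ⟨z, hz, hcz, hkz, hvz⟩)
          · exact Or.inl h
          · exact Or.inr ⟨z, Or.inr hz, hcz, hkz, hvz⟩
        · rintro (h | ⟨z, rfl | hz, hcz, hkz, hvz⟩)
          · exact Or.inl h
          · exact absurd hkz.symm hk
          · exact Or.inr ⟨z, hz, hcz, hkz, hvz⟩
    · rw [if_neg hc, ih]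
      simp only [List.mem_cons]
      constructor
      · rintro (h | ⟨z, hz, hcz, hkz, hvz⟩)
        · exact Or.inl h
        · exact Or.inr ⟨z, Or.inr hz, hcz, hkz, hvz⟩
      · rintro (h | ⟨z, rfl | hz, hcz, hkz, hvz⟩)
        · exact Or.inl h
        · exact absurd hcz hc
        · exact Or.inr ⟨z, hz, hcz, hkz, hvz⟩

theorem bBucket_pair (req : List String) :
    req.foldl bBucketStep (PySem.Dict.empty, PySem.Dict.empty) =
      (req.foldl (fun d p => if 10 ≤ PySem.Str.len p then PySem.Dict.modify d (pvPre p) [] (fun s => PySem.Set.add s p) else d) PySem.Dict.empty,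
       req.foldl (fun d p => if 10 ≤ PySem.Str.len p then PySem.Dict.modify d (pvPre p) [] (fun s => PySem.Set.add s (pvSuf p)) else d) PySem.Dict.empty) := by
  have h : bBucketStep = fun (st : PySem.Dict String (PySem.Set String) × PySem.Dict String (PySem.Set String)) p =>
      ((fun d p => if 10 ≤ PySem.Str.len p then PySem.Dict.modify d (pvPre p) [] (fun s => PySem.Set.add s p) else d) st.1 p,
       (fun d p => if 10 ≤ PySem.Str.len p then PySem.Dict.modify d (pvPre p) [] (fun s => PySem.Set.add s (pvSuf p)) else d) st.2 p) := by
    funext st p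
    unfold bBucketStep
    by_cases hl : 10 ≤ PySem.Str.len p
    · rw [if_pos hl]
      exact congrArg₂ Prod.mk (if_pos hl).symm (if_pos hl).symm
    · rw [if_neg hl]
      exact congrArg₂ Prod.mk (if_neg hl).symm (if_neg hl).symm
  rw [h, PySem.List.foldl_prod_mk
    (f := fun d p => if 10 ≤ PySem.Str.len p then PySem.Dict.modify d (pvPre p) [] (fun s => PySem.Set.add s p) else d)
    (g := fun d p => if 10 ≤ PySem.Str.len p then PySem.Dict.modify d (pvPre p) [] (fun s => PySem.Set.add s (pvSuf p)) else d)]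

theorem bBuckets_mem (req : List String) (k y : String) :
    y ∈ ((req.foldl bBucketStep (PySem.Dict.empty, PySem.Dict.empty)).1).getD k [] ↔
      y ∈ req ∧ 10 ≤ PySem.Str.len y ∧ pvPre y = k := by
  rw [bBucket_pair]
  rw [mem_getD_fold_modify_add (key := pvPre) (val := fun p => p) (c := fun p => 10 ≤ PySem.Str.len p)]
  simp only [PySem.Dict.getD_empty, List.not_mem_nil, false_or]
  constructor
  · rintro ⟨p, hp, hl, hk, rfl⟩
    exact ⟨hp, hl, hk⟩
  · rintro ⟨hy, hl, hk⟩
    exact ⟨y, hy, hl, hk, rfl⟩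

theorem bSufs_mem (req : List String) (k y : String) :
    y ∈ ((req.foldl bBucketStep (PySem.Dict.empty, PySem.Dict.empty)).2).getD k [] ↔
      ∃ p ∈ req, 10 ≤ PySem.Str.len p ∧ pvPre p = k ∧ pvSuf p = y := by
  rw [bBucket_pair]
  rw [mem_getD_fold_modify_add (key := pvPre) (val := pvSuf) (c := fun p => 10 ≤ PySem.Str.len p)]
  simp only [PySem.Dict.getD_empty, List.not_mem_nil, false_or]

-- one qualifying partner turns A's inner-loop effect into this single update
def aEnsurePush (part1 prefix1 : String)
    (st : PySem.Dict String String × PySem.Dict String (List String)) :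
    PySem.Dict String String × PySem.Dict String (List String) :=
  if part1 ∈ st.2.getD prefix1 [] then st
  else (st.1.insert part1 prefix1,
        (if st.2.contains prefix1 then st.2 else st.2.insert prefix1 []).insert prefix1
          (st.2.getD prefix1 [] ++ [part1]))

theorem aInnerStep_fix (part1 prefix1 : String)
    (st : PySem.Dict String String × PySem.Dict String (List String)) (p2 : String)
    (h : part1 ∈ st.2.getD prefix1 ([] : List String)) :
    aInnerStep part1 prefix1 st p2 = st := by
  have hc : st.2.contains prefix1 = true := by
    by_contra hc'
    rw [PySem.Dict.getD_of_not_contains _ _ (Bool.eq_false_iff.2 hc')] at h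
    exact List.not_mem_nil h
  unfold aInnerStep
  split
  · split
    · simp [h]
    · rfl
  · rfl

theorem aInner_fix (part1 prefix1 : String)
    (st : PySem.Dict String String × PySem.Dict String (List String)) (l2 : List String)
    (h : part1 ∈ st.2.getD prefix1 ([] : List String)) :
    l2.foldl (aInnerStep part1 prefix1) st = st := by
  induction l2 with
  | nil => rfl
  | cons p2 t ih => rw [List.foldl_cons, aInnerStep_fix part1 prefix1 st p2 h]; exact ih

theorem aInnerStep_hit (part1 prefix1 : String)
    (st : PySem.Dict String String × PySem.Dict String (List String)) (p2 : String)
    (hq : part1 ≠ p2 ∧ 10 ≤ PySem.Str.len p2 ∧ pvPre p2 = prefix1 ∧ pvSuf part1 ≠ pvSuf p2) :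
    aInnerStep part1 prefix1 st p2 = aEnsurePush part1 prefix1 st := by
  unfold aInnerStep aEnsurePush
  rw [if_pos ⟨hq.1, hq.2.1⟩, if_pos ⟨hq.2.2.1, hq.2.2.2⟩]
  by_cases hc : st.2.contains prefix1 = true
  · simp only [hc, if_true]
  · have hd : st.2.getD prefix1 ([] : List String) = [] :=
      PySem.Dict.getD_of_not_contains _ _ (Bool.eq_false_iff.2 hc)
    simp only [hc, if_false, Bool.false_eq_true]
    rw [PySem.Dict.getD_insert_self, hd]
    simp

theorem mem_aEnsurePush (part1 prefix1 : String)
    (st : PySem.Dict String String × PySem.Dict String (List String)) :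
    part1 ∈ (aEnsurePush part1 prefix1 st).2.getD prefix1 ([] : List String) := by
  unfold aEnsurePush
  by_cases h : part1 ∈ st.2.getD prefix1 ([] : List String)
  · rw [if_pos h]; exact h
  · rw [if_neg h]
    simp only
    rw [PySem.Dict.getD_insert_self]
    exact List.mem_append_right _ List.mem_cons_self

theorem aInner_result (part1 prefix1 : String)
    (st : PySem.Dict String String × PySem.Dict String (List String)) (l2 : List String) :
    l2.foldl (aInnerStep part1 prefix1) st =
      if ∃ p2 ∈ l2, part1 ≠ p2 ∧ 10 ≤ PySem.Str.len p2 ∧ pvPre p2 = prefix1 ∧ pvSuf part1 ≠ pvSuf p2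
      then aEnsurePush part1 prefix1 st else st := by
  induction l2 generalizing st with
  | nil => simp
  | cons p2 t ih =>
    rw [List.foldl_cons]
    by_cases hq : part1 ≠ p2 ∧ 10 ≤ PySem.Str.len p2 ∧ pvPre p2 = prefix1 ∧ pvSuf part1 ≠ pvSuf p2
    · rw [aInnerStep_hit part1 prefix1 st p2 hq,
        aInner_fix part1 prefix1 _ t (mem_aEnsurePush part1 prefix1 st),
        if_pos ⟨p2, List.mem_cons_self, hq⟩]
    · have hstep : aInnerStep part1 prefix1 st p2 = st := by
        unfold aInnerStep
        by_cases h1 : part1 ≠ p2 ∧ 10 ≤ PySem.Str.len p2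
        · rw [if_pos h1, if_neg (fun h2 => hq ⟨h1.1, h1.2, h2.1, h2.2⟩)]
        · rw [if_neg h1]
      rw [hstep, ih]
      congr 1
      simp only [eq_iff_iff]
      constructor
      · rintro ⟨z, hz, h⟩
        exact ⟨z, List.mem_cons_of_mem _ hz, h⟩
      · rintro ⟨z, hmem, h⟩
        rcases List.mem_cons.1 hmem with rfl | hz
        · exact absurd h hq
        · exact ⟨z, hz, h⟩

-- A's detection structures, characterized
theorem aDetect_inv (req : List String) (l : List String)
    (st : PySem.Dict String String × PySem.Dict String (List String))
    (hst : st = l.foldl (fun st part1 =>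
        if 10 ≤ PySem.Str.len part1 then req.foldl (aInnerStep part1 (pvPre part1)) st else st)
        (PySem.Dict.empty, PySem.Dict.empty)) :
    ∀ q, (st.1.contains q = true ↔ q ∈ l ∧ pvIsLR req q) ∧
      (pvIsLR req q → st.1.getD q "" = (if q ∈ l then pvPre q else "")) ∧
      (∀ k, q ∈ st.2.getD k [] ↔ (q ∈ l ∧ pvIsLR req q ∧ pvPre q = k)) := by
  subst hst
  induction l using List.reverseRecOn with
  | nil =>
    intro q
    refine ⟨by simp [PySem.Dict.contains_empty], fun _ => by simp [PySem.Dict.getD_empty], fun k => by simp [PySem.Dict.getD_empty]⟩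
  | append_singleton l part1 ih =>
    intro q
    simp only [List.foldl_append, List.foldl_cons, List.foldl_nil]
    set st := l.foldl (fun st part1 =>
        if 10 ≤ PySem.Str.len part1 then req.foldl (aInnerStep part1 (pvPre part1)) st else st)
        ((PySem.Dict.empty : PySem.Dict String String),
         (PySem.Dict.empty : PySem.Dict String (List String))) with hst
    by_cases hlen : 10 ≤ PySem.Str.len part1
    · rw [if_pos hlen, aInner_result]
      by_cases hE : ∃ p2 ∈ req, part1 ≠ p2 ∧ 10 ≤ PySem.Str.len p2 ∧ pvPre p2 = pvPre part1 ∧ pvSuf part1 ≠ pvSuf p2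
      · have hLR : pvIsLR req part1 := ⟨hlen, hE⟩
        rw [if_pos hE]
        unfold aEnsurePush
        by_cases hmem : part1 ∈ st.2.getD (pvPre part1) ([] : List String)
        · -- part1 was already recorded: it occurs earlier in l
          have hin : part1 ∈ l := (((ih part1).2.2 (pvPre part1)).1 hmem).1
          rw [if_pos hmem]
          refine ⟨?_, ?_, ?_⟩
          · rw [(ih q).1]
            constructor
            · rintro ⟨hq, h2⟩; exact ⟨List.mem_append_left _ hq, h2⟩
            · rintro ⟨hq, h2⟩
              rcases List.mem_append.1 hq with hq | hq
              · exact ⟨hq, h2⟩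
              · exact ⟨List.mem_singleton.1 hq ▸ hin, h2⟩
          · intro hq
            rw [(ih q).2.1 hq]
            by_cases hql : q ∈ l
            · rw [if_pos hql, if_pos (List.mem_append_left _ hql)]
            · rw [if_neg hql, if_neg (fun h => hql ?_)]
              rcases List.mem_append.1 h with h | h
              · exact h
              · exact List.mem_singleton.1 h ▸ hin
          · intro k
            rw [(ih q).2.2 k]
            constructor
            · rintro ⟨hq, h2⟩; exact ⟨List.mem_append_left _ hq, h2⟩
            · rintro ⟨hq, h2⟩
              rcases List.mem_append.1 hq with hq | hq
              · exact ⟨hq, h2⟩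
              · exact ⟨List.mem_singleton.1 hq ▸ hin, h2⟩
        · -- part1 is new
          have hnin : part1 ∉ l := fun hl => hmem (((ih part1).2.2 (pvPre part1)).2 ⟨hl, hLR, rfl⟩)
          rw [if_neg hmem]
          have hgetD : ∀ k', (if st.2.contains (pvPre part1) = true then st.2
              else st.2.insert (pvPre part1) ([] : List String)).getD k' [] = st.2.getD k' [] := by
            intro k'
            split
            · rfl
            · rename_i hc
              by_cases hk' : k' = pvPre part1
              · subst hk'
                rw [PySem.Dict.getD_insert_self,
                  PySem.Dict.getD_of_not_contains _ _ (Bool.eq_false_iff.2 hc)]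
              · rw [PySem.Dict.getD_insert_of_ne (hne := hk')]
          refine ⟨?_, ?_, ?_⟩
          · simp only [PySem.Dict.contains_insert, Bool.or_eq_true, beq_iff_eq]
            rw [(ih q).1]
            constructor
            · rintro (rfl | ⟨hq, h2⟩)
              · exact ⟨List.mem_append_right _ List.mem_cons_self, hLR⟩
              · exact ⟨List.mem_append_left _ hq, h2⟩
            · rintro ⟨hq, h2⟩
              rcases List.mem_append.1 hq with hq | hq
              · exact Or.inr ⟨hq, h2⟩
              · exact Or.inl (List.mem_singleton.1 hq)
          · intro hq
            by_cases hqp : q = part1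
            · subst hqp
              rw [PySem.Dict.getD_insert_self, if_pos (List.mem_append_right _ List.mem_cons_self)]
            · rw [PySem.Dict.getD_insert_of_ne (hne := hqp), (ih q).2.1 hq]
              by_cases hql : q ∈ l
              · rw [if_pos hql, if_pos (List.mem_append_left _ hql)]
              · rw [if_neg hql, if_neg (fun h => ?_)]
                rcases List.mem_append.1 h with h | h
                · exact hql h
                · exact hqp (List.mem_singleton.1 h)
          · intro k
            by_cases hk : k = pvPre part1
            · subst hk
              rw [PySem.Dict.getD_insert_self]
              simp only [List.mem_append, List.mem_singleton]
              rw [(ih q).2.2 (pvPre part1)]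
              constructor
              · rintro ((⟨hq, h2, h3⟩) | rfl)
                · exact ⟨Or.inl hq, h2, h3⟩
                · exact ⟨Or.inr rfl, hLR, rfl⟩
              · rintro ⟨hq | rfl, h2, h3⟩
                · exact Or.inl ⟨hq, h2, h3⟩
                · exact Or.inr rfl
            · rw [PySem.Dict.getD_insert_of_ne (hne := hk), hgetD, (ih q).2.2 k]
              constructor
              · rintro ⟨hq, h2⟩; exact ⟨List.mem_append_left _ hq, h2⟩
              · rintro ⟨hq, h2, h3⟩
                rcases List.mem_append.1 hq with hq | hq
                · exact ⟨hq, h2, h3⟩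
                · rcases List.mem_singleton.1 hq with rfl
                  exact absurd h3.symm hk
      · -- no qualifying partner: part1 is not L/R-specific
        have hnLR : ¬ pvIsLR req part1 := fun h => hE h.2
        rw [if_neg hE]
        refine ⟨?_, ?_, ?_⟩
        · rw [(ih q).1]
          constructor
          · rintro ⟨hq, h2⟩; exact ⟨List.mem_append_left _ hq, h2⟩
          · rintro ⟨hq, h2⟩
            rcases List.mem_append.1 hq with hq | hq
            · exact ⟨hq, h2⟩
            · exact absurd h2 (List.mem_singleton.1 hq ▸ hnLR)
        · intro hq
          rw [(ih q).2.1 hq]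
          have hqp : q ≠ part1 := fun h => hnLR (h ▸ hq)
          by_cases hql : q ∈ l
          · rw [if_pos hql, if_pos (List.mem_append_left _ hql)]
          · rw [if_neg hql, if_neg (fun h => ?_)]
            rcases List.mem_append.1 h with h | h
            · exact hql h
            · exact hqp (List.mem_singleton.1 h)
        · intro k
          rw [(ih q).2.2 k]
          constructor
          · rintro ⟨hq, h2⟩; exact ⟨List.mem_append_left _ hq, h2⟩
          · rintro ⟨hq, h2, h3⟩
            rcases List.mem_append.1 hq with hq | hq
            · exact ⟨hq, h2, h3⟩
            · exact absurd h2 (List.mem_singleton.1 hq ▸ hnLR)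
    · -- short part: nothing changes, and part1 cannot be L/R-specific
      have hnLR : ¬ pvIsLR req part1 := fun h => hlen h.1
      rw [if_neg hlen]
      refine ⟨?_, ?_, ?_⟩
      · rw [(ih q).1]
        constructor
        · rintro ⟨hq, h2⟩; exact ⟨List.mem_append_left _ hq, h2⟩
        · rintro ⟨hq, h2⟩
          rcases List.mem_append.1 hq with hq | hq
          · exact ⟨hq, h2⟩
          · exact absurd h2 (List.mem_singleton.1 hq ▸ hnLR)
      · intro hq
        rw [(ih q).2.1 hq]
        have hqp : q ≠ part1 := fun h => hnLR (h ▸ hq)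
        by_cases hql : q ∈ l
        · rw [if_pos hql, if_pos (List.mem_append_left _ hql)]
        · rw [if_neg hql, if_neg (fun h => ?_)]
          rcases List.mem_append.1 h with h | h
          · exact hql h
          · exact hqp (List.mem_singleton.1 h)
      · intro k
        rw [(ih q).2.2 k]
        constructor
        · rintro ⟨hq, h2⟩; exact ⟨List.mem_append_left _ hq, h2⟩
        · rintro ⟨hq, h2, h3⟩
          rcases List.mem_append.1 hq with hq | hq
          · exact ⟨hq, h2, h3⟩
          · exact absurd h2 (List.mem_singleton.1 hq ▸ hnLR)

theorem aDetect_spec (req : List String) :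
    (∀ q, (aDetect req).1.contains q = true ↔ q ∈ req ∧ pvIsLR req q) ∧
    (∀ q, q ∈ req → pvIsLR req q → (aDetect req).1.getD q "" = pvPre q) ∧
    (∀ k q, q ∈ (aDetect req).2.getD k [] ↔ q ∈ req ∧ pvIsLR req q ∧ pvPre q = k) := by
  have hinv := aDetect_inv req req (aDetect req) rfl
  refine ⟨fun q => (hinv q).1, fun q hq hlr => ?_, fun k q => (hinv q).2.2 k⟩
  have h := (hinv q).2.1 hlr
  rw [if_pos hq] at h
  exact h

theorem bIsLr_eq (req : List String) (p : String) :
    bIsLr (req.foldl bBucketStep (PySem.Dict.empty, PySem.Dict.empty)).2 p = true ↔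
      pvIsLR req p := by
  unfold bIsLr pvIsLR
  simp only [Bool.and_eq_true, decide_eq_true_eq, List.any_eq_true, bne_iff_ne]
  constructor
  · rintro ⟨hl, t, ht, hne⟩
    rcases (bSufs_mem req _ t).1 ht with ⟨q, hq, hql, hqp, rfl⟩
    exact ⟨hl, q, hq, fun h => hne (by rw [h]), hql, hqp, fun h => hne h.symm⟩
  · rintro ⟨hl, q, hq, _, hql, hqp, hqs⟩
    exact ⟨hl, pvSuf q, (bSufs_mem req _ _).2 ⟨q, hq, hql, hqp, rfl⟩, fun h => hqs h.symm⟩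

-- pointwise: A's matched = B's ok, for part drawn from required_parts
theorem matched_eq_ok (req : List String) (pd : PySem.Dict String (List String))
    (pair_lane pattern : String) (parts : List String) (part : String) (hp : part ∈ req) :
    aMatched PySem.Set.empty (aDetect req).1 (aDetect req).2 pd pair_lane pattern parts part =
      bOk (req.foldl bBucketStep (PySem.Dict.empty, PySem.Dict.empty)).1
        (req.foldl bBucketStep (PySem.Dict.empty, PySem.Dict.empty)).2
        pd pair_lane pattern (PySem.Set.ofList parts) part := by
  have hgd := aDetect_spec req
  have hpset : PySem.Set.contains (PySem.Set.ofList parts) part = parts.contains part := by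
    by_cases h : part ∈ parts <;> simp [h]
  unfold aMatched bOk
  rw [hpset]
  rw [if_neg (show ¬ (PySem.Set.contains (PySem.Set.empty : PySem.Set String) part = true) by
    simp)]
  by_cases hLR : pvIsLR req part
  · have hsp : (aDetect req).1.contains part = true := (hgd.1 part).2 ⟨hp, hLR⟩
    have hbl : bIsLr (req.foldl bBucketStep (PySem.Dict.empty, PySem.Dict.empty)).2 part = true :=
      (bIsLr_eq req part).2 hLR
    simp only [hsp, hbl, if_true]
    by_cases hc : parts.contains part = true
    · have hm : part ∈ parts := by simpa using hc
      simp [hm]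
    · simp only [hc, Bool.false_eq_true, if_false]
      by_cases hpl : pair_lane ≠ ""
      · rw [if_pos hpl, if_pos (⟨hpl, trivial⟩ : pair_lane ≠ "" ∧ True)]
        cases hget : pd.get? (pair_lane ++ "|" ++ pattern) with
        | none =>
          have hcont : pd.contains (pair_lane ++ "|" ++ pattern) = false := by
            rw [PySem.Dict.contains_eq_isSome_get?, hget]; rfl
          simp [hcont]
        | some pp =>
          have hcont : pd.contains (pair_lane ++ "|" ++ pattern) = true := by
            rw [PySem.Dict.contains_eq_isSome_get?, hget]; rfl
          have hgdv : pd.getD (pair_lane ++ "|" ++ pattern) [] = pp := by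
            rw [PySem.Dict.getD_eq_get?_getD, hget]; rfl
          simp only [hcont, if_true, hgdv]
          rw [hgd.2.1 part hp hLR]
          rw [Bool.eq_iff_iff]
          simp only [List.any_eq_true, Bool.and_eq_true, bne_iff_ne]
          constructor
          · rintro ⟨q, hq, hne, hin⟩
            rcases (hgd.2.2 (pvPre part) q).1 hq with ⟨hq1, hq2, hq3⟩
            exact ⟨q, (bBuckets_mem req (pvPre part) q).2 ⟨hq1, hq2.1, hq3⟩, hne, hin⟩
          · rintro ⟨q, hq, hne, hin⟩
            rcases (bBuckets_mem req (pvPre part) q).1 hq with ⟨hq1, hq2, hq3⟩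
            have hqLR : pvIsLR req q := by
              by_cases hsuf : pvSuf q = pvSuf part
              · rcases hLR with ⟨hl1, w, hw, hpw, hwl, hwpre, hpsuf⟩
                refine ⟨hq2, w, hw, ?_, hwl, hwpre.trans hq3.symm, ?_⟩
                · rintro rfl
                  exact hpsuf (hsuf.symm)
                · rw [hsuf]; exact hpsuf
              · exact ⟨hq2, part, hp, hne, hLR.1, hq3.symm, hsuf⟩
            exact ⟨q, (hgd.2.2 (pvPre part) q).2 ⟨hq1, hqLR, hq3⟩, hne, hin⟩
      · rw [if_neg hpl, if_neg (fun h : pair_lane ≠ "" ∧ True => hpl h.1)]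
  · have hsp : (aDetect req).1.contains part = false :=
      Bool.eq_false_iff.2 (fun h => hLR ((hgd.1 part).1 h).2)
    have hbl : bIsLr (req.foldl bBucketStep (PySem.Dict.empty, PySem.Dict.empty)).2 part = false :=
      Bool.eq_false_iff.2 (fun h => hLR ((bIsLr_eq req part).1 h))
    simp only [hsp, hbl, Bool.false_eq_true, if_false, and_false]
    by_cases hc : parts.contains part = true <;> simp

-- the score comparison: the middle component of A's triple is determined by the first
theorem pyGt3_eq_pyGt2 (m e m' e' n : Int) :
    pyGt3 (m, m - n, e) (m', m' - n, e') = pyGt2 (m, e) (m', e') := by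
  unfold pyGt3 pyGt2
  by_cases h1 : m' < m
  · simp [h1]
  · by_cases h2 : m = m'
    · subst h2
      simp
    · simp [h1, show (m == m') = false from beq_eq_false_iff_ne.2 h2]

theorem pyGt3_sentinel (m x y : Int) (h : 0 ≤ m) :
    pyGt3 (m, x, y) (-1, 999999, 999999) = true := by
  unfold pyGt3
  simp only [Bool.or_eq_true, decide_eq_true_eq]
  left; omega

-- the relation carried through the pattern loop
def pvRel (n : Int) (a : String × (Int × Int × Int)) (b : Option ((Int × Int) × String)) : Prop :=
  (a = ("", ((-1 : Int), (999999 : Int), (999999 : Int))) ∧ b = none) ∨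
  (∃ m e p, 0 ≤ m ∧ a = (p, (m, m - n, e)) ∧ b = some ((m, e), p))

theorem score_step_rel (lane : String) (req : List String)
    (pd : PySem.Dict String (List String)) (pair_lane : String)
    (a : String × (Int × Int × Int)) (b : Option ((Int × Int) × String))
    (item : String × List String) (h : pvRel (req.length : Int) a b) :
    pvRel (req.length : Int)
      (aScoreStep lane req PySem.Set.empty (aDetect req).1 (aDetect req).2 pd pair_lane a item)
      (bScoreStep lane req (req.foldl bBucketStep (PySem.Dict.empty, PySem.Dict.empty)).1
        (req.foldl bBucketStep (PySem.Dict.empty, PySem.Dict.empty)).2 pd pair_lane b item) := by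
  unfold aScoreStep bScoreStep
  by_cases hs : PySem.Str.startswith item.1 (lane ++ "|") = true
  · rw [if_pos hs, if_pos hs]
    simp only
    -- abbreviations
    set pat := PySem.List.pyGetD ((PySem.Str.split? item.1 "|").getD []) 1 "" with hpat
    set pA := fun part => aMatched PySem.Set.empty (aDetect req).1 (aDetect req).2 pd pair_lane pat item.2 part with hpA
    set pB := fun part => bOk (req.foldl bBucketStep (PySem.Dict.empty, PySem.Dict.empty)).1
        (req.foldl bBucketStep (PySem.Dict.empty, PySem.Dict.empty)).2 pd pair_lane pat (PySem.Set.ofList item.2) part with hpB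
    -- A's two counters are countP of matched / not-matched
    have hsplit : (fun (mm : Int × Int) part => if pA part = true then (mm.1 + 1, mm.2) else (mm.1, mm.2 + 1)) =
        (fun (mm : Int × Int) part =>
          ((fun (a : Int) part => if pA part = true then a + 1 else a) mm.1 part,
           (fun (a : Int) part => if pA part = true then a else a + 1) mm.2 part)) := by
      funext mm part
      by_cases hm : pA part = true
      · rw [if_pos hm]
        exact congrArg₂ Prod.mk (if_pos hm).symm (if_pos hm).symm
      · rw [if_neg hm]
        exact congrArg₂ Prod.mk (if_neg hm).symm (if_neg hm).symm
    have hflip : (fun (a : Int) part => if pA part = true then a else a + 1) =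
        (fun (a : Int) part => if (!pA part) = true then a + 1 else a) := by
      funext a part
      cases hm : pA part <;> simp
    have hmm : req.foldl (fun (mm : Int × Int) part =>
          if pA part = true then (mm.1 + 1, mm.2) else (mm.1, mm.2 + 1)) ((0 : Int), (0 : Int)) =
        ((req.countP pA : Int), (req.countP (fun part => !pA part) : Int)) := by
      rw [hsplit, PySem.List.foldl_prod_mk
        (f := fun (a : Int) part => if pA part = true then a + 1 else a)
        (g := fun (a : Int) part => if pA part = true then a else a + 1)]
      rw [hflip, PySem.List.foldl_if_add_one, PySem.List.foldl_if_add_one]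
      simp
    rw [hmm]
    -- the two programs count the same parts
    have hcnt : req.countP pA = req.countP pB :=
      List.countP_congr (fun part hpart => by
        rw [hpA, hpB]
        simp only
        rw [matched_eq_ok req pd pair_lane pat item.2 part hpart])
    have hnot : (req.countP (fun part => !pA part) : Int) = (req.length : Int) - (req.countP pA : Int) := by
      have h1 := List.length_eq_countP_add_countP pA (l := req)
      have h2 : req.countP (fun part => !pA part) = req.countP (fun a => decide ¬(pA a = true)) :=
        List.countP_congr (fun x _ => by simp)
      omega
    rw [hcnt, hnot, hcnt]
    set m : Int := (req.countP pB : Int) with hm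
    have hm0 : 0 ≤ m := by positivity
    have hsc3 : ((m, -((req.length : Int) - m), -((item.2.length : Int) - m)) : Int × Int × Int) =
        (m, m - (req.length : Int), m - (item.2.length : Int)) := by
      norm_num
    rcases h with ⟨ha, hb⟩ | ⟨m', e', p', hm', ha, hb⟩
    · subst ha; subst hb
      simp only
      rw [hsc3, pyGt3_sentinel _ _ _ hm0, if_pos rfl]
      exact Or.inr ⟨m, m - (item.2.length : Int), pat, hm0, rfl, rfl⟩
    · subst ha; subst hb
      simp only
      rw [hsc3, pyGt3_eq_pyGt2 m (m - (item.2.length : Int)) m' e' (req.length : Int)]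
      by_cases hgt : pyGt2 (m, m - (item.2.length : Int)) (m', e') = true
      · rw [hgt, if_pos rfl, if_pos rfl]
        exact Or.inr ⟨m, m - (item.2.length : Int), pat, hm0, rfl, rfl⟩
      · rw [Bool.eq_false_iff.2 hgt, if_neg (by simp), if_neg (by simp)]
        exact Or.inr ⟨m', e', p', hm', rfl, rfl⟩
  · rw [if_neg hs, if_neg hs]
    exact h

theorem foldl_rel {α β γ : Type} (R : α → β → Prop) (f : α → γ → α) (g : β → γ → β)
    (l : List γ) (a : α) (b : β) (h : R a b) (hstep : ∀ a b x, R a b → R (f a x) (g b x)) :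
    R (l.foldl f a) (l.foldl g b) := by
  induction l generalizing a b with
  | nil => exact h
  | cons x t ih => exact ih _ _ (hstep _ _ _ h)

-- ===== VERDICT (by name: the statement is the Claim_ definition above) =====
theorem find_best_pattern_simple_py_spec : Claim_equal_find_best_pattern_simple_py := by
  intro lane req pdl lrl _
  unfold Spec_find_best_pattern_simple_py find_best_pattern_simple_py find_best_pattern_simple_py_alt
  have h := foldl_rel (pvRel (req.length : Int))
    (aScoreStep lane req PySem.Set.empty (aDetect req).1 (aDetect req).2
      (PySem.Dict.ofList pdl) ((PySem.Dict.ofList lrl).getD lane ""))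
    (bScoreStep lane req (req.foldl bBucketStep (PySem.Dict.empty, PySem.Dict.empty)).1
      (req.foldl bBucketStep (PySem.Dict.empty, PySem.Dict.empty)).2
      (PySem.Dict.ofList pdl) ((PySem.Dict.ofList lrl).getD lane ""))
    (PySem.Dict.ofList pdl).items
    ("", ((-1 : Int), (999999 : Int), (999999 : Int))) none
    (Or.inl ⟨rfl, rfl⟩)
    (fun a b x hab => score_step_rel _ _ _ _ a b x hab)
  rcases h with ⟨ha, hb⟩ | ⟨m, e, p, _, ha, hb⟩ <;> simp only [ha, hb]
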